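-- pv_equiv track=rewrite | github.com/Sungayoung/Algorithm | 02_swexpert/4366_정식이의 은행업무.py | find_decimal
-- ===== SOURCE A (Python) =====
-- def change_num(num, n):
--     answer = 0
--     power = 0
--     for idx in range(len(num) - 1, -1, -1):
--         answer += num[idx] * (n ** power)
--         power += 1
--
--     return answer
--
-- def find_decimal(bin_num, ter_num):
--     # 모든 2진수 자리 탐색
--     for i in range(len(bin_num)):
--         bin_num[i] = (bin_num[i] + 1) % 2
--         new_binary_num = change_num(bin_num, 2)
--
--         # 모든 3진수 자리 탐색
--         for j in range(len(ter_num)):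
--             tmp_ternary = ter_num[:]
--             for k in range(2):
--                 tmp_ternary[j] = (tmp_ternary[j] + 1) % 3
--                 new_ternary_num = change_num(tmp_ternary, 3)
--                 if new_ternary_num == new_binary_num:
--                     return new_binary_num
--         bin_num[i] = (bin_num[i] + 1) % 2
-- ===== SOURCE B (Python) =====
-- def find_decimal(bin_num, ter_num):
--     # value of the ternary number and the set of every one-digit-change value
--     t = 0
--     for d in ter_num:
--         t = 3 * t + d
--     cands = set()
--     p = 1
--     for d in reversed(ter_num):
--         cands.add(t + ((d + 1) % 3 - d) * p)
--         cands.add(t + ((d + 2) % 3 - d) * p)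
--         p *= 3
--     # scan the binary positions left to right, flipping the bit at each one:
--     # pref holds the value of the bits already passed, suf the value of the rest
--     v = 0
--     for d in bin_num:
--         v = 2 * v + d
--     pref = 0
--     suf = v
--     p = 2 ** len(bin_num)
--     for d in bin_num:
--         p //= 2
--         suf -= d * p
--         c = (2 * pref + 1 - d % 2) * p + suf
--         if c in cands:
--             return c
--         pref = 2 * pref + d % 2
--     return None
-- ===== Notes on version B (the rewrite author's own statement) =====
-- stated objective: faster
-- what changed: B precomputes all one-change ternary values into a hash set once, then scans the binary positions in one left-to-right pass maintaining prefix/suffix values with O(1) incremental updates, instead of re-evaluating the whole binary and ternary numbers digit by digit inside triply nested loops.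
import Mathlib
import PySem

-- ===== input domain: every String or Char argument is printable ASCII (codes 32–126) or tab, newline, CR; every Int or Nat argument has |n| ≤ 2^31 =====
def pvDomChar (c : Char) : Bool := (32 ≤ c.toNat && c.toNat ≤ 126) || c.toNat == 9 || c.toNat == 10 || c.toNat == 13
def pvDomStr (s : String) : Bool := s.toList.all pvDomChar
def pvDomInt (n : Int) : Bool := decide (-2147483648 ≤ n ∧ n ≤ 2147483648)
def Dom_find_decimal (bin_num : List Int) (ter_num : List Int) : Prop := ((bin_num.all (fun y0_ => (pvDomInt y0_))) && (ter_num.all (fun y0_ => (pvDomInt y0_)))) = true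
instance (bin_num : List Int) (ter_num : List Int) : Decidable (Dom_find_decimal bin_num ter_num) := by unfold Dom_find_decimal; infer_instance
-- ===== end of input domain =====

-- B precomputes the one-change ternary values into a set and scans the single-bit-flip
-- binary candidates with O(1) incremental updates (asymptotically faster than A's nested
-- loops). A mutates bin_num in place; B does not: the equivalence is about the return value.


-- ===== PORT A =====
-- change_num: loop idx from len(num)-1 down to -1 (exclusive), answer += num[idx]*n**power
def change_num (num : List Int) (n : Int) : Int :=
  ((PySem.List.pyRange ((num.length : Int) - 1) (-1) (-1)).foldl
    (fun (st : Int × Nat) idx => (st.1 + PySem.List.pyGetD num idx 0 * n ^ st.2, st.2 + 1))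
    ((0 : Int), (0 : Nat))).1

-- the 'for k in range(2)' loop: tmp_ternary[j] = (tmp_ternary[j]+1)%3, compare, return on hit
def fd_kloop (tmp : List Int) (j : Nat) (nb : Int) : Nat → Option Int
  | 0 => none
  | k + 1 =>
    let tmp' := tmp.set j (PySem.Int.mod (tmp.getD j 0 + 1) 3)
    if change_num tmp' 3 = nb then some nb else fd_kloop tmp' j nb k

-- the 'for j in range(len(ter_num))' loop: fresh copy tmp_ternary = ter_num[:] each j
def fd_jloop (ter : List Int) (nb : Int) : List Nat → Option Int
  | [] => none
  | j :: js =>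
    match fd_kloop ter j nb 2 with
    | some v => some v
    | none => fd_jloop ter nb js

-- the 'for i in range(len(bin_num))' loop, mutating the binary list (flip, and flip back)
def fd_iloop (ter : List Int) : List Int → List Nat → Option Int
  | _, [] => none
  | bin, i :: is =>
    let bin1 := bin.set i (PySem.Int.mod (bin.getD i 0 + 1) 2)
    let nb := change_num bin1 2
    match fd_jloop ter nb (List.range ter.length) with
    | some v => some v
    | none => fd_iloop ter (bin1.set i (PySem.Int.mod (bin1.getD i 0 + 1) 2)) is

def find_decimal (bin_num : List Int) (ter_num : List Int) : Option Int :=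
  fd_iloop ter_num bin_num (List.range bin_num.length)

-- ===== PORT B =====
-- 'for d in reversed(ter_num): cands.add(t + ((d+1)%3 - d)*p); cands.add(t + ((d+2)%3 - d)*p); p *= 3'
def fd_tcands (t : Int) : List Int → PySem.Set Int → Int → PySem.Set Int
  | [], s, _ => s
  | d :: rest, s, p =>
    fd_tcands t rest
      (PySem.Set.add (PySem.Set.add s (t + (PySem.Int.mod (d + 1) 3 - d) * p))
        (t + (PySem.Int.mod (d + 2) 3 - d) * p))
      (p * 3)

-- 'for d in bin_num: p //= 2; suf -= d*p; c = (2*pref + 1 - d%2)*p + suf;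
--  if c in cands: return c; pref = 2*pref + d%2'
def fd_bscan (cands : PySem.Set Int) : List Int → Int → Int → Int → Option Int
  | [], _, _, _ => none
  | d :: rest, pref, suf, p =>
    let p' := PySem.Int.floordiv p 2
    let suf' := suf - d * p'
    let c := (2 * pref + 1 - PySem.Int.mod d 2) * p' + suf'
    if PySem.Set.contains cands c then some c
    else fd_bscan cands rest (2 * pref + PySem.Int.mod d 2) suf' p'

def find_decimal_alt (bin_num : List Int) (ter_num : List Int) : Option Int :=
  let t := ter_num.foldl (fun a d => 3 * a + d) 0
  let cands := fd_tcands t ter_num.reverse PySem.Set.empty 1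
  let v := bin_num.foldl (fun a d => 2 * a + d) 0
  fd_bscan cands bin_num 0 v (2 ^ bin_num.length)

-- ===== PRECONDITION & SPEC =====
-- (A is total on List Int inputs: no Pre_)
def Spec_find_decimal (bin_num : List Int) (ter_num : List Int) (out : Option Int) : Prop := out = find_decimal_alt bin_num ter_num
instance (bin_num : List Int) (ter_num : List Int) (out : Option Int) : Decidable (Spec_find_decimal bin_num ter_num out) := by unfold Spec_find_decimal; infer_instance

-- ===== CLAIM (what is proved, stated in full; the proofs are below) =====
def Claim_equal_find_decimal : Prop := ∀ (bin_num : List Int) (ter_num : List Int), Dom_find_decimal bin_num ter_num → Spec_find_decimal bin_num ter_num (find_decimal bin_num ter_num)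

-- ===== LEMMAS AND PROOFS =====

-- the positional value Σ l[j] * n^(len-1-j), the common denotation of both programs
def pvVal (n : Int) : List Int → Int
  | [] => 0
  | d :: rest => d * n ^ rest.length + pvVal n rest

theorem pvVal_append (n d : Int) (l : List Int) :
    pvVal n (l ++ [d]) = n * pvVal n l + d := by
  induction l with
  | nil => simp [pvVal]
  | cons x rest ih => simp [pvVal, ih, pow_succ]; ring

theorem foldl_horner (n : Int) (l : List Int) (a : Int) :
    l.foldl (fun a d => n * a + d) a = a * n ^ l.length + pvVal n l := by
  induction l generalizing a with
  | nil => simp [pvVal]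
  | cons d rest ih => simp [ih, pvVal, pow_succ]; ring

theorem pvVal_set (n x : Int) (l : List Int) (j : Nat) (hj : j < l.length) :
    pvVal n (l.set j x) = pvVal n l + (x - l.getD j 0) * n ^ (l.length - 1 - j) := by
  induction l generalizing j with
  | nil => simp at hj
  | cons d rest ih =>
    cases j with
    | zero => simp [pvVal]; ring
    | succ j =>
      simp only [List.set, pvVal, List.length_set, List.getD_cons_succ, List.length_cons]
      rw [ih j (by simpa using hj)]
      have : rest.length + 1 - 1 - (j + 1) = rest.length - 1 - j := by omega
      rw [this]; ring

theorem change_num_eq (num : List Int) (n : Int) : change_num num n = pvVal n num := by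
  have hrange : PySem.List.pyRange ((num.length : Int) - 1) (-1) (-1)
      = (List.range num.length).map (fun k : Nat => (num.length : Int) - 1 - (k : Int)) := by
    simp only [PySem.List.pyRange]
    norm_num
    rcases Nat.eq_zero_or_pos num.length with h | h
    · simp [h]
    · rw [if_pos (by exact_mod_cast h)]
      exact List.map_congr_left (fun k hk => by ring)
  unfold change_num
  rw [hrange]
  suffices h : ∀ (l : List Int) (a : Int) (p : Nat),
      List.foldl
        (fun (st : Int × Nat) (k : Nat) =>
          (st.1 + PySem.List.pyGetD l ((l.length : Int) - 1 - (k : Int)) 0 * n ^ st.2, st.2 + 1))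
        (a, p) (List.range l.length) = (a + pvVal n l * n ^ p, p + l.length) by
    rw [List.foldl_map, h num 0 0]; simp
  intro l
  induction l using List.reverseRecOn with
  | nil => intro a p; simp [pvVal]
  | append_singleton rest d ih =>
    intro a p
    rw [List.length_append, List.length_singleton, List.range_succ_eq_map,
      List.foldl_cons, List.foldl_map]
    have hget : PySem.List.pyGetD (rest ++ [d]) (((rest.length + 1 : Nat) : Int) - 1 - ((0:Nat) : Int)) 0 = d := by
      have : (((rest.length + 1 : Nat) : Int) - 1 - ((0:Nat) : Int)) = ((rest.length : Nat) : Int) := by push_cast; ring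
      rw [this, PySem.List.pyGetD_natCast]; simp
    rw [PySem.List.foldl_congr_mem _ _
      (fun (st : Int × Nat) (k : Nat) =>
        (st.1 + PySem.List.pyGetD rest ((rest.length : Int) - 1 - (k : Int)) 0 * n ^ st.2, st.2 + 1)) _
      (by
        intro st k hk
        rw [List.mem_range] at hk
        have hidx : (((rest.length + 1 : Nat) : Int) - 1 - ((k + 1 : Nat) : Int)) = (rest.length : Int) - 1 - (k : Int) := by
          push_cast; ring
        have h1 : ((rest.length : Int) - 1 - (k : Int)) = ((rest.length - 1 - k : Nat) : Int) := by omega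
        simp only [Nat.succ_eq_add_one, hidx, h1, PySem.List.pyGetD_natCast]
        rw [List.getD_append _ _ _ _ (by omega)])]
    rw [hget, ih, pvVal_append, Prod.mk.injEq]
    refine ⟨by ring, by omega⟩

-- proof-side name for the j-th one-change ternary candidate value
def pvTc (ter : List Int) (c : Int) (j : Nat) : Int :=
  pvVal 3 ter + (PySem.Int.mod (ter.getD j 0 + c) 3 - ter.getD j 0) * 3 ^ (ter.length - 1 - j)

theorem mem_fd_tcands (t : Int) (l : List Int) :
    ∀ (s : PySem.Set Int) (p : Int) (x : Int),
      x ∈ fd_tcands t l s p ↔ x ∈ s ∨ ∃ k < l.length,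
        (x = t + (PySem.Int.mod (l.getD k 0 + 1) 3 - l.getD k 0) * (p * 3 ^ k) ∨
         x = t + (PySem.Int.mod (l.getD k 0 + 2) 3 - l.getD k 0) * (p * 3 ^ k)) := by
  induction l with
  | nil => intro s p x; simp [fd_tcands]
  | cons d rest ih =>
    intro s p x
    rw [fd_tcands, ih, PySem.Set.mem_add, PySem.Set.mem_add]
    constructor
    · rintro (((hs | h1) | h2) | ⟨k, hk, h⟩)
      · exact Or.inl hs
      · exact Or.inr ⟨0, by simp, Or.inl (by simpa using h1)⟩
      · exact Or.inr ⟨0, by simp, Or.inr (by simpa using h2)⟩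
      · refine Or.inr ⟨k + 1, by simpa using hk, ?_⟩
        simpa [pow_succ, mul_assoc, mul_comm, mul_left_comm] using h
    · rintro (hs | ⟨k, hk, h⟩)
      · exact Or.inl (Or.inl (Or.inl hs))
      · cases k with
        | zero =>
          rcases h with h | h
          · exact Or.inl (Or.inl (Or.inr (by simpa using h)))
          · exact Or.inl (Or.inr (by simpa using h))
        | succ k =>
          refine Or.inr ⟨k, by simpa using hk, ?_⟩
          simpa [pow_succ, mul_assoc, mul_comm, mul_left_comm] using h

theorem mem_cands_iff (ter : List Int) (x : Int) :
    x ∈ fd_tcands (pvVal 3 ter) ter.reverse PySem.Set.empty 1 ↔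
      ∃ j < ter.length, (pvTc ter 1 j = x ∨ pvTc ter 2 j = x) := by
  rw [mem_fd_tcands]
  simp only [PySem.Set.empty, List.not_mem_nil, false_or, List.length_reverse]
  constructor
  · rintro ⟨k, hk, h⟩
    refine ⟨ter.length - 1 - k, by omega, ?_⟩
    have hg : ter.reverse.getD k 0 = ter.getD (ter.length - 1 - k) 0 := by
      rw [List.getD_eq_getElem _ _ (by simpa), List.getD_eq_getElem _ _ (by omega),
        List.getElem_reverse]
    have he : ter.length - 1 - (ter.length - 1 - k) = k := by omega
    rcases h with h | h
    · exact Or.inl (by rw [pvTc, he, ← hg]; rw [h]; ring)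
    · exact Or.inr (by rw [pvTc, he, ← hg]; rw [h]; ring)
  · rintro ⟨j, hj, h⟩
    refine ⟨ter.length - 1 - j, by omega, ?_⟩
    have hg : ter.reverse.getD (ter.length - 1 - j) 0 = ter.getD j 0 := by
      rw [List.getD_eq_getElem _ _ (by simp; omega), List.getD_eq_getElem _ _ (by omega),
        List.getElem_reverse]
      congr 1
      omega
    rcases h with h | h
    · exact Or.inl (by rw [← h, pvTc, hg]; ring_nf)
    · exact Or.inr (by rw [← h, pvTc, hg]; ring_nf)

theorem pvMod3 (a : Int) : PySem.Int.mod a 3 = a % 3 := PySem.Int.mod_eq_emod_of_pos (by norm_num)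

-- the two iterations of the k-loop try the candidates (d+1)%3 and (d+2)%3
theorem fd_kloop_eq (ter : List Int) (j : Nat) (nb : Int) (hj : j < ter.length) :
    fd_kloop ter j nb 2 =
      if pvTc ter 1 j = nb ∨ pvTc ter 2 j = nb then some nb else none := by
  have hget1 : (ter.set j (PySem.Int.mod (ter.getD j 0 + 1) 3)).getD j 0
      = PySem.Int.mod (ter.getD j 0 + 1) 3 := by
    rw [List.getD_eq_getElem _ _ (by simpa), List.getElem_set_self]
  have hv1 : change_num (ter.set j (PySem.Int.mod (ter.getD j 0 + 1) 3)) 3 = pvTc ter 1 j := by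
    rw [change_num_eq, pvVal_set _ _ _ _ hj, pvTc]
  have hmm : PySem.Int.mod (PySem.Int.mod (ter.getD j 0 + 1) 3 + 1) 3
      = PySem.Int.mod (ter.getD j 0 + 2) 3 := by
    simp only [pvMod3]; omega
  have hv2 : change_num ((ter.set j (PySem.Int.mod (ter.getD j 0 + 1) 3)).set j
      (PySem.Int.mod (ter.getD j 0 + 2) 3)) 3 = pvTc ter 2 j := by
    rw [List.set_set, change_num_eq, pvVal_set _ _ _ _ hj, pvTc]
  rw [fd_kloop]
  simp only [hv1]
  by_cases h1 : pvTc ter 1 j = nb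
  · rw [if_pos h1, if_pos (Or.inl h1)]
  · rw [if_neg h1, fd_kloop]
    simp only [hget1, hmm, hv2]
    by_cases h2 : pvTc ter 2 j = nb
    · rw [if_pos h2, if_pos (Or.inr h2)]
    · rw [if_neg h2, if_neg (by tauto), fd_kloop]

theorem fd_jloop_eq (ter : List Int) (nb : Int) :
    ∀ js : List Nat, (∀ j ∈ js, j < ter.length) →
      fd_jloop ter nb js =
        if ∃ j ∈ js, (pvTc ter 1 j = nb ∨ pvTc ter 2 j = nb) then some nb else none := by
  intro js
  induction js with
  | nil => intro _; simp [fd_jloop]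
  | cons j js ih =>
    intro hjs
    rw [fd_jloop, fd_kloop_eq ter j nb (hjs j (by simp))]
    by_cases h1 : pvTc ter 1 j = nb ∨ pvTc ter 2 j = nb
    · rw [if_pos h1]
      rw [if_pos ⟨j, by simp, h1⟩]
    · rw [if_neg h1]
      rw [ih (fun x hx => hjs x (by simp [hx]))]
      by_cases h2 : ∃ x ∈ js, pvTc ter 1 x = nb ∨ pvTc ter 2 x = nb
      · rw [if_pos h2, if_pos (by rcases h2 with ⟨x, hx, h⟩; exact ⟨x, by simp [hx], h⟩)]
      · rw [if_neg h2, if_neg (by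
          rintro ⟨x, hx, h⟩
          rcases List.mem_cons.mp hx with rfl | hx'
          · exact h1 h
          · exact h2 ⟨x, hx', h⟩)]

-- pvVal splits across an append
theorem pvVal_split (n : Int) (a b : List Int) :
    pvVal n (a ++ b) = pvVal n a * n ^ b.length + pvVal n b := by
  induction a with
  | nil => simp [pvVal]
  | cons x rest ih => simp [pvVal, ih, pow_add]; ring

-- the binary list with the first i digits reduced mod 2 (A's flip-then-restore residue)
def pvNorm (l : List Int) (i : Nat) : List Int :=
  (l.take i).map (fun d => PySem.Int.mod d 2) ++ l.drop i

theorem length_pvNorm (l : List Int) (i : Nat) (hi : i ≤ l.length) :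
    (pvNorm l i).length = l.length := by
  simp [pvNorm]
  omega

theorem getD_pvNorm_self (l : List Int) (i : Nat) (hi : i < l.length) :
    (pvNorm l i).getD i 0 = l.getD i 0 := by
  have hlen : ((l.take i).map (fun d => PySem.Int.mod d 2)).length = i := by simp; omega
  rw [pvNorm, List.getD_append_right _ _ _ _ (by omega), hlen, Nat.sub_self]
  rw [List.getD_eq_getElem _ _ (by simp; omega), List.getD_eq_getElem _ _ hi]
  simp [List.getElem_drop]

theorem pvNorm_succ (l : List Int) (i : Nat) (hi : i < l.length) :
    pvNorm l (i + 1) = (pvNorm l i).set i (PySem.Int.mod (l.getD i 0) 2) := by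
  have hlen : ((l.take i).map (fun d => PySem.Int.mod d 2)).length = i := by simp; omega
  have hd : l.drop i = l.getD i 0 :: l.drop (i + 1) := by
    rw [List.getD_eq_getElem _ _ hi]
    exact List.drop_eq_getElem_cons hi
  have htk : l.take (i + 1) = l.take i ++ [l.getD i 0] := by
    rw [List.getD_eq_getElem _ _ hi]
    exact List.take_succ_eq_append_getElem hi
  rw [pvNorm, pvNorm, hd, htk, List.map_append]
  rw [List.set_append_right _ _ (by omega)]
  rw [hlen, Nat.sub_self, List.set_cons_zero, List.append_assoc]
  simp

-- value of the mod-2-reduced prefix, B's pref accumulator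
def pvPref (l : List Int) (i : Nat) : Int :=
  pvVal 2 ((l.take i).map (fun d => PySem.Int.mod d 2))

theorem pvPref_succ (l : List Int) (i : Nat) (hi : i < l.length) :
    pvPref l (i + 1) = 2 * pvPref l i + PySem.Int.mod (l.getD i 0) 2 := by
  have htk : l.take (i + 1) = l.take i ++ [l.getD i 0] := by
    rw [List.getD_eq_getElem _ _ hi]
    exact List.take_succ_eq_append_getElem hi
  rw [pvPref, pvPref, htk, List.map_append, List.map_singleton, pvVal_append]

theorem pvVal_pvNorm (l : List Int) (i : Nat) (_hi : i ≤ l.length) :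
    pvVal 2 (pvNorm l i) = pvPref l i * 2 ^ (l.length - i) + pvVal 2 (l.drop i) := by
  rw [pvNorm, pvVal_split, pvPref, List.length_drop]

-- the i-loop of A, run on the normalized list, is B's prefix/suffix candidate scan
theorem fd_iloop_eq (ter : List Int) :
    ∀ (k i : Nat) (orig : List Int),
      i + k = orig.length →
      fd_iloop ter (pvNorm orig i) (List.range' i k) =
        fd_bscan (fd_tcands (pvVal 3 ter) ter.reverse PySem.Set.empty 1)
          (orig.drop i) (pvPref orig i) (pvVal 2 (orig.drop i)) (2 ^ k) := by
  intro k
  induction k with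
  | zero =>
    intro i orig hlen
    rw [List.range'_zero, List.drop_of_length_le (by omega)]
    rfl
  | succ k ih =>
    intro i orig hlen
    have hi : i < orig.length := by omega
    have hplen : (pvNorm orig i).length = orig.length := length_pvNorm _ _ (by omega)
    have hgd : (pvNorm orig i).getD i 0 = orig.getD i 0 := getD_pvNorm_self _ _ hi
    set d := orig.getD i 0 with hd
    have hdrop : orig.drop i = d :: orig.drop (i + 1) := by
      rw [hd, List.getD_eq_getElem _ _ hi]
      exact List.drop_eq_getElem_cons hi
    have hfdiv : PySem.Int.floordiv ((2 : Int) ^ (k + 1)) 2 = 2 ^ k := by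
      rw [PySem.Int.floordiv_eq_ediv_of_pos (by norm_num), pow_succ,
        Int.mul_ediv_cancel _ (by norm_num)]
    have hsuf : pvVal 2 (d :: orig.drop (i + 1)) - d * 2 ^ k = pvVal 2 (orig.drop (i + 1)) := by
      rw [pvVal]
      have : (orig.drop (i + 1)).length = k := by rw [List.length_drop]; omega
      rw [this]; ring
    rw [List.range'_succ, hdrop, fd_iloop, fd_bscan]
    simp only [hfdiv, hgd, hsuf]
    have hflip : PySem.Int.mod (d + 1) 2 = 1 - PySem.Int.mod d 2 := by
      simp only [PySem.Int.mod_eq_emod_of_pos (b := 2) (by norm_num)]; omega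
    have hnb : change_num ((pvNorm orig i).set i (PySem.Int.mod (d + 1) 2)) 2
        = (2 * pvPref orig i + 1 - PySem.Int.mod d 2) * 2 ^ k + pvVal 2 (orig.drop (i + 1)) := by
      rw [change_num_eq, pvVal_set _ _ _ _ (by omega), hgd, hplen]
      have h1 : orig.length - 1 - i = k := by omega
      rw [h1, pvVal_pvNorm _ _ (by omega), hdrop, pvVal, hflip]
      have h2 : (orig.drop (i + 1)).length = k := by rw [List.length_drop]; omega
      have h3 : orig.length - i = k + 1 := by omega
      rw [h2, h3, pow_succ]; ring
    rw [hnb]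
    rw [fd_jloop_eq _ _ _ (by intro j hj; simpa using List.mem_range.mp hj)]
    set c := (2 * pvPref orig i + 1 - PySem.Int.mod d 2) * 2 ^ k + pvVal 2 (orig.drop (i + 1))
      with hc
    have hcond : (∃ j ∈ List.range ter.length, pvTc ter 1 j = c ∨ pvTc ter 2 j = c)
        ↔ c ∈ fd_tcands (pvVal 3 ter) ter.reverse PySem.Set.empty 1 := by
      rw [mem_cands_iff]
      simp [List.mem_range]
    by_cases hmem : c ∈ fd_tcands (pvVal 3 ter) ter.reverse PySem.Set.empty 1
    · rw [if_pos (hcond.mpr hmem), if_pos (by rw [PySem.Set.contains_iff]; exact hmem)]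
    · rw [if_neg (fun h => hmem (hcond.mp h)),
        if_neg (by rw [PySem.Set.contains_iff]; exact hmem)]
      have hset1 : ((pvNorm orig i).set i (PySem.Int.mod (d + 1) 2)).getD i 0
          = PySem.Int.mod (d + 1) 2 := by
        rw [List.getD_eq_getElem _ _ (by rw [List.length_set]; omega), List.getElem_set_self]
      have hmm : PySem.Int.mod (PySem.Int.mod (d + 1) 2 + 1) 2 = PySem.Int.mod d 2 := by
        simp only [PySem.Int.mod_eq_emod_of_pos (b := 2) (by norm_num)]; omega
      rw [hset1, hmm, List.set_set, hd, ← pvNorm_succ _ _ hi, ← pvPref_succ _ _ hi]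
      exact ih (i + 1) orig (by omega)

-- ===== VERDICT (by name: the statement is the Claim_ definition above) =====
theorem find_decimal_spec : Claim_equal_find_decimal := by
  intro bin ter _
  unfold Spec_find_decimal find_decimal find_decimal_alt
  have hmain := fd_iloop_eq ter bin.length 0 bin (by omega)
  have hnorm0 : pvNorm bin 0 = bin := by simp [pvNorm]
  rw [hnorm0, List.drop_zero] at hmain
  rw [List.range_eq_range', hmain]
  simp only [foldl_horner, zero_mul, zero_add, pvPref, List.take_zero, List.map_nil, pvVal]
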